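-- pv_equiv track=rewrite | github.com/superhac/vpinfe | common/score_parser.py | low_nibble_pairs_to_text
-- ===== SOURCE A (Python) =====
-- def low_nibble_pairs_to_text(byte_vals: list[int]) -> str:
--     """Decode packed initials from pairs of low nibbles."""
--     if len(byte_vals) % 2 != 0:
--         raise ValueError("Packed nibble text requires an even number of bytes")
--
--     chars = []
--     for index in range(0, len(byte_vals), 2):
--         char_code = ((byte_vals[index] & 0x0F) << 4) | (byte_vals[index + 1] & 0x0F)
--         chars.append(chr(char_code))
--
--     return "".join(chars)
-- ===== SOURCE B (Python) =====
-- def low_nibble_pairs_to_text(byte_vals: list[int]) -> str: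
--     """Decode packed initials from pairs of low nibbles."""
--     if len(byte_vals) % 2 != 0:
--         raise ValueError("Packed nibble text requires an even number of bytes")
--
--     hexstr = "".join(format(b & 0x0F, "x") for b in byte_vals)
--     return bytes.fromhex(hexstr).decode("latin-1")
-- ===== Notes on version B (the rewrite author's own statement) =====
-- stated objective: idiomatic
-- what changed: Replaces the index loop over range(0,n,2) that shifts and ORs nibble pairs with a hex-string pipeline: each low nibble becomes one hex digit, the joined hex string is decoded at once with bytes.fromhex(...).decode('latin-1').
-- outside the precondition, e.g. on low_nibble_pairs_to_text([1]): A raises ValueError, B raises ValueError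
import Mathlib
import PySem

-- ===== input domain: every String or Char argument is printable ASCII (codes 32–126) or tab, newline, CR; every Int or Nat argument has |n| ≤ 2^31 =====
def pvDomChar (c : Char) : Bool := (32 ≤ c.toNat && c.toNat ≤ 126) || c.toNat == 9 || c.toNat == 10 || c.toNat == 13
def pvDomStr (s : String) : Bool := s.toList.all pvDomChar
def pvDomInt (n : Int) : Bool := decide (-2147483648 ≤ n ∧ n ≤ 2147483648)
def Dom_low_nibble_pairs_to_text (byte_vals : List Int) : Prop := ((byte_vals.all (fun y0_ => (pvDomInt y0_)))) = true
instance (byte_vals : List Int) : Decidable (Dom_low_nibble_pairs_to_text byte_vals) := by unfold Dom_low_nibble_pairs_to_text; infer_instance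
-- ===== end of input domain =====

-- B decodes the nibble pairs through a hex string (one hex digit per low nibble, then
-- pairwise fromhex) instead of A's index loop with shift/OR; same O(n) cost, more idiomatic.

-- ===== PORT A =====
-- Under Pre_ (even length) every index is in range, so pyGetD's default is never used.
def low_nibble_pairs_to_text (byte_vals : List Int) : String :=
  let chars : List Char :=
    (PySem.List.pyRange 0 (byte_vals.length : Int) 2).foldl
      (fun acc index =>
        acc ++ [Char.ofNat
          (PySem.Int.bor
            ((PySem.Int.band (PySem.List.pyGetD byte_vals index 0) 15) <<< (4 : Nat))
            (PySem.Int.band (PySem.List.pyGetD byte_vals (index + 1) 0) 15)).toNat])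
      []
  String.mk chars

-- ===== PORT B =====
-- format(b & 0xF, 'x'): one lowercase hex digit (b & 0xF is always in 0..15)
def pvHexDigit (n : Int) : Char :=
  if n < 10 then Char.ofNat (48 + n.toNat) else Char.ofNat (87 + n.toNat)

def pvHexVal (c : Char) : Nat :=
  if 97 ≤ c.toNat then c.toNat - 87 else c.toNat - 48

-- bytes.fromhex + decode('latin-1'): consume the hex digits two at a time
def pvFromHexPairs : List Char → List Char
  | c1 :: c2 :: rest => Char.ofNat (16 * pvHexVal c1 + pvHexVal c2) :: pvFromHexPairs rest
  | _ => []

def low_nibble_pairs_to_text_alt (byte_vals : List Int) : String :=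
  let hexstr : List Char := byte_vals.map (fun b => pvHexDigit (PySem.Int.band b 15))
  String.mk (pvFromHexPairs hexstr)

-- ===== PRECONDITION & SPEC =====
-- A raises ValueError on an odd number of bytes; Pre_ excludes exactly those inputs.
def Pre_low_nibble_pairs_to_text (byte_vals : List Int) : Prop :=
  byte_vals.length % 2 = 0
instance (byte_vals : List Int) : Decidable (Pre_low_nibble_pairs_to_text byte_vals) := by
  unfold Pre_low_nibble_pairs_to_text; infer_instance

def pvWitness_low_nibble_pairs_to_text : List Int := [7, 2, -6, 9]

def Spec_low_nibble_pairs_to_text (byte_vals : List Int) (out : String) : Prop :=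
  out = low_nibble_pairs_to_text_alt byte_vals
instance (byte_vals : List Int) (out : String) : Decidable (Spec_low_nibble_pairs_to_text byte_vals out) := by
  unfold Spec_low_nibble_pairs_to_text; infer_instance

-- ===== CLAIM (what is proved, stated in full; the proofs are below) =====
def Claim_equal_low_nibble_pairs_to_text : Prop := ∀ (byte_vals : List Int), Dom_low_nibble_pairs_to_text byte_vals → Pre_low_nibble_pairs_to_text byte_vals → Spec_low_nibble_pairs_to_text byte_vals (low_nibble_pairs_to_text byte_vals)

-- ===== LEMMAS AND PROOFS =====

-- common form both sides reach: one char per nibble pair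
def pairRec : List Int → List Char
  | x :: y :: t =>
      Char.ofNat (16 * (PySem.Int.band x 15).toNat + (PySem.Int.band y 15).toNat) :: pairRec t
  | _ => []

lemma band15_bounds (x : Int) : 0 ≤ PySem.Int.band x 15 ∧ PySem.Int.band x 15 < 16 := by
  simp only [PySem.Int.band]
  norm_num
  split_ifs with h
  · have h1 : x.toNat &&& Int.toNat 15 ≤ Int.toNat 15 := Nat.and_le_right
    have h2 : Int.toNat 15 = 15 := rfl
    omega
  · have h1 : Int.toNat 15 - (Int.toNat 15 &&& (-x - 1).toNat) ≤ Int.toNat 15 := Nat.sub_le _ _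
    have h2 : Int.toNat 15 = 15 := rfl
    omega

lemma shift_or_fin : ∀ (a b : Fin 16),
    ((a : Nat) <<< 4) ||| (b : Nat) = 16 * a + b := by decide

lemma code_eq (x y : Int) :
    (PySem.Int.bor ((PySem.Int.band x 15) <<< (4 : Nat)) (PySem.Int.band y 15)).toNat
      = 16 * (PySem.Int.band x 15).toNat + (PySem.Int.band y 15).toNat := by
  obtain ⟨ha0, ha16⟩ := band15_bounds x
  obtain ⟨hb0, hb16⟩ := band15_bounds y
  set a := PySem.Int.band x 15 with hadef
  set b := PySem.Int.band y 15 with hbdef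
  have hacast : a = (a.toNat : Int) := by omega
  have hbcast : b = (b.toNat : Int) := by omega
  rw [hacast, hbcast]
  have hshift : ((a.toNat : Int)) <<< (4 : Nat) = ((a.toNat <<< 4 : Nat) : Int) := by
    simp [Int.shiftLeft_eq, Nat.shiftLeft_eq]
  rw [hshift, PySem.Int.bor_natCast]
  have := shift_or_fin ⟨a.toNat, by omega⟩ ⟨b.toNat, by omega⟩
  simp only [Int.toNat_natCast]
  omega

lemma hexVal_hexDigit (n : Int) (h0 : 0 ≤ n) (h16 : n < 16) :
    pvHexVal (pvHexDigit n) = n.toNat := by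
  interval_cases n <;> decide

lemma B_pairRec : ∀ (bv : List Int),
    pvFromHexPairs (bv.map (fun b => pvHexDigit (PySem.Int.band b 15))) = pairRec bv
  | [] => rfl
  | [_] => rfl
  | x :: y :: t => by
      have hx := band15_bounds x
      have hy := band15_bounds y
      simp only [List.map, pvFromHexPairs, pairRec,
        hexVal_hexDigit _ hx.1 hx.2, hexVal_hexDigit _ hy.1 hy.2, B_pairRec t]

lemma A_loop (bv : List Int) : ∀ (m j : Nat) (acc : List Char), j + 2 * m = bv.length →
    ((List.range m).map (fun k : Nat => ((j : Int) + 2 * k))).foldl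
      (fun acc index =>
        acc ++ [Char.ofNat
          (PySem.Int.bor
            ((PySem.Int.band (PySem.List.pyGetD bv index 0) 15) <<< (4 : Nat))
            (PySem.Int.band (PySem.List.pyGetD bv (index + 1) 0) 15)).toNat]) acc
    = acc ++ pairRec (bv.drop j) := by
  intro m
  induction m with
  | zero =>
      intro j acc h
      have hj : j = bv.length := by omega
      subst hj
      simp [pairRec, List.drop_length]
  | succ m ih =>
      intro j acc h
      have hj1 : j < bv.length := by omega
      have hj2 : j + 1 < bv.length := by omega
      rw [List.range_succ_eq_map, List.map_cons, List.map_map, List.foldl_cons]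
      have hfun : ((fun k : Nat => ((j : Int) + 2 * k)) ∘ Nat.succ)
          = (fun k : Nat => (((j + 2 : Nat) : Int) + 2 * k)) := by
        funext k; simp [Function.comp, Nat.succ_eq_add_one]; push_cast; ring
      rw [hfun, ih (j + 2) _ (by omega)]
      have hg1 : PySem.List.pyGetD bv ((j : Int)) 0 = bv[j] := by
        rw [PySem.List.pyGetD_natCast]; simp [List.getD, hj1]
      have hg2 : PySem.List.pyGetD bv ((j : Int) + 1) 0 = bv[j + 1] := by
        have : ((j : Int) + 1) = ((j + 1 : Nat) : Int) := by push_cast; ring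
        rw [this, PySem.List.pyGetD_natCast]; simp [List.getD, hj2]
      have hdrop : bv.drop j = bv[j] :: bv[j + 1] :: bv.drop (j + 2) := by
        rw [List.drop_eq_getElem_cons hj1, List.drop_eq_getElem_cons hj2]
      rw [hdrop]
      simp only [pairRec, Nat.cast_zero, mul_zero, add_zero, hg1, hg2, code_eq,
        List.append_assoc, List.singleton_append]

theorem low_nibble_pairs_to_text_spec : Claim_equal_low_nibble_pairs_to_text := by
  intro bv _hdom hpre
  unfold Pre_low_nibble_pairs_to_text at hpre
  obtain ⟨m, hm⟩ : ∃ m, bv.length = 2 * m := ⟨bv.length / 2, by omega⟩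
  have hB : low_nibble_pairs_to_text_alt bv = String.mk (pairRec bv) := by
    simp only [low_nibble_pairs_to_text_alt, B_pairRec]
  have hA : low_nibble_pairs_to_text bv = String.mk (pairRec bv) := by
    simp only [low_nibble_pairs_to_text]
    rw [PySem.List.pyRange_of_pos 0 (bv.length : Int) (by norm_num)]
    have hcount : (if (0 : Int) < (bv.length : Int) then
        (((bv.length : Int) - 0 + 2 - 1) / 2).toNat else 0) = m := by
      split_ifs with h <;> omega
    rw [hcount]
    have hfun : (fun k : Nat => (0 : Int) + 2 * (k : Int))
        = (fun k : Nat => (((0 : Nat) : Int) + 2 * (k : Int))) := by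
      funext k; norm_num
    rw [hfun, A_loop bv m 0 [] (by omega)]
    simp
  unfold Spec_low_nibble_pairs_to_text
  rw [hA, hB]
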